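-- pv_equiv track=rewrite | github.com/Sayeem2004/AdventOfCode | 2015/D16/1/1.py | solve
-- ===== SOURCE A (Python) =====
-- def solve(lines,dict):
--     points = {};
--     for i,line in enumerate(lines):
--         p = 0;
--         for l in line:
--             if (int(l[1]) == dict[l[0]]):
--                 p += 1;
--         points[i+1] = p;
--     mx = 0;
--     for p in points:
--         mx = max(points[p],mx);
--     for p in points:
--         if (points[p] == mx):
--             return p;
--     return 0;
-- ===== SOURCE B (Python) =====
-- def solve(lines, dict):
--     best_idx = 0
--     best_score = -1
--     for i, line in enumerate(lines):
--         p = len([l for l in line if dict[l[0]] == int(l[1])])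
--         if p > best_score:
--             best_idx, best_score = i + 1, p
--     return best_idx
-- ===== Notes on version B (the rewrite author's own statement) =====
-- stated objective: simpler
-- what changed: Replaced A's three passes (build an index->score dict, fold for the max, rescan the dict for the first key at the max) by one scan over the lines that maintains a running best index and best score, with no dict at all.
import Mathlib
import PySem

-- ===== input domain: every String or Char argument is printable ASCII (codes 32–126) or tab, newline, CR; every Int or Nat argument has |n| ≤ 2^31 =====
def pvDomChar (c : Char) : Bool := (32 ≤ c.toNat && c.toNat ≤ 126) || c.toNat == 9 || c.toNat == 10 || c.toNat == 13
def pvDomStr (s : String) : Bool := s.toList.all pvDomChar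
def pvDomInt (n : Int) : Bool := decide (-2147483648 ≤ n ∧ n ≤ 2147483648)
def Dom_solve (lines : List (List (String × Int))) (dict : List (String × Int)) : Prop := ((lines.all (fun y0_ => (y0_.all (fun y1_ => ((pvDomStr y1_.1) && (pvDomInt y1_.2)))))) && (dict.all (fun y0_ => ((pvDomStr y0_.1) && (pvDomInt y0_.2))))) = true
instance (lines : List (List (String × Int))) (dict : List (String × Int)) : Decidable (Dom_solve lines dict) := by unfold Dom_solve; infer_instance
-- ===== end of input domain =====

-- B replaces A's three passes (index->score dict, max fold, first-match rescan) by one scan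
-- keeping a running best index/score; return values proved equal wherever every key used in
-- `lines` occurs in `dict` (elsewhere Python A raises KeyError).

-- ===== PORT A =====
-- dict[k]: the association list viewed as a Python dict (dict(pairs): last duplicate wins);
-- a missing key is a Python KeyError — those inputs are excluded by Pre_solve below.
def solveDictGet (dict : List (String × Int)) (k : String) : Option Int :=
  (PySem.Dict.ofList dict).get? k

def solveScore (dict : List (String × Int)) (line : List (String × Int)) : Int :=
  line.foldl (fun p l => if solveDictGet dict l.1 = some l.2 then p + 1 else p) 0

def solvePoints (lines : List (List (String × Int))) (dict : List (String × Int)) : PySem.Dict Int Int :=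
  (PySem.List.enumerate lines).foldl
    (fun pts il => pts.insert (il.1 + 1) (solveScore dict il.2)) PySem.Dict.empty

def solveMx (points : PySem.Dict Int Int) : Int :=
  points.keys.foldl (fun mx p => max (points.getD p 0) mx) 0

def solve (lines : List (List (String × Int))) (dict : List (String × Int)) : Int :=
  let points := solvePoints lines dict
  let mx := solveMx points
  match points.keys.find? (fun p => points.getD p 0 == mx) with
  | some p => p
  | none => 0

-- ===== PORT B =====
def solveAltScore (dict : List (String × Int)) (line : List (String × Int)) : Int :=
  ((line.filter (fun l => solveDictGet dict l.1 == some l.2)).length : Int)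

def solve_alt (lines : List (List (String × Int))) (dict : List (String × Int)) : Int :=
  ((PySem.List.enumerate lines).foldl
    (fun st il =>
      let p := solveAltScore dict il.2
      if p > st.2 then (il.1 + 1, p) else st) ((0 : Int), (-1 : Int))).1

-- ===== PRECONDITION & SPEC =====
-- Pre_: every key used in `lines` occurs in `dict`; on any other input Python A raises KeyError.
def Pre_solve (lines : List (List (String × Int))) (dict : List (String × Int)) : Prop :=
  (lines.all (fun line => line.all (fun l => dict.any (fun q => q.1 == l.1)))) = true
instance (lines : List (List (String × Int))) (dict : List (String × Int)) : Decidable (Pre_solve lines dict) := by unfold Pre_solve; infer_instance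
def pvWitness_solve : (List (List (String × Int))) × (List (String × Int)) :=
  ([[("a", 1), ("b", 2)], [("a", 0)]], [("a", 1), ("b", 2)])

def Spec_solve (lines : List (List (String × Int))) (dict : List (String × Int)) (out : Int) : Prop := out = solve_alt lines dict
instance (lines : List (List (String × Int))) (dict : List (String × Int)) (out : Int) : Decidable (Spec_solve lines dict out) := by unfold Spec_solve; infer_instance

-- ===== CLAIM (what is proved, stated in full; the proofs are below) =====
def Claim_equal_solve : Prop := ∀ (lines : List (List (String × Int))) (dict : List (String × Int)), Dom_solve lines dict → Pre_solve lines dict → Spec_solve lines dict (solve lines dict)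

-- ===== LEMMAS AND PROOFS =====

-- the two score computations agree
theorem score_eq (dict : List (String × Int)) (line : List (String × Int)) :
    solveScore dict line = solveAltScore dict line := by
  suffices h : ∀ (l : List (String × Int)) (p0 : Int),
      l.foldl (fun p x => if solveDictGet dict x.1 = some x.2 then p + 1 else p) p0
        = p0 + ((l.filter (fun x => solveDictGet dict x.1 == some x.2)).length : Int) by
    simpa [solveScore, solveAltScore] using h line 0
  intro l
  induction l with
  | nil => simp
  | cons a t ih =>
    intro p0
    by_cases h : solveDictGet dict a.1 = some a.2
    · simp [h, ih]; ring
    · simp [h, ih]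

theorem score_nonneg (dict : List (String × Int)) (line : List (String × Int)) :
    0 ≤ solveAltScore dict line := by
  unfold solveAltScore
  exact Int.natCast_nonneg _

-- running max over a score list, with base 0 (A's `mx = 0` initialisation)
def runMax (xs : List Int) : Int := xs.foldl (fun m v => max v m) 0

theorem foldl_max_le_init (xs : List Int) : ∀ init : Int, init ≤ xs.foldl (fun m v => max v m) init := by
  induction xs with
  | nil => intro init; simp
  | cons a t ih => intro init; exact le_trans (le_max_right a init) (ih (max a init))

theorem mem_le_foldl_max (y : Int) (xs : List Int) :
    ∀ init : Int, y ∈ xs → y ≤ xs.foldl (fun m v => max v m) init := by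
  induction xs with
  | nil => intro init h; cases h
  | cons a t ih =>
    intro init h
    rcases List.mem_cons.mp h with rfl | hmem
    · exact le_trans (le_max_left y init) (foldl_max_le_init t _)
    · exact ih _ hmem

theorem foldl_max_mem (xs : List Int) :
    ∀ init : Int, xs.foldl (fun m v => max v m) init = init ∨ xs.foldl (fun m v => max v m) init ∈ xs := by
  induction xs with
  | nil => intro init; left; rfl
  | cons a t ih =>
    intro init
    rcases ih (max a init) with h | h
    · rcases max_choice a init with hm | hm
      · right; rw [List.foldl_cons, h, hm]; exact List.mem_cons_self
      · left; rw [List.foldl_cons, h, hm]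
    · right; exact List.mem_cons_of_mem _ h

theorem runMax_mem (xs : List Int) (hne : xs ≠ []) (hpos : ∀ x ∈ xs, 0 ≤ x) :
    runMax xs ∈ xs := by
  rcases foldl_max_mem xs 0 with h | h
  · obtain ⟨y, hy⟩ := List.exists_mem_of_ne_nil xs hne
    have h1 : y ≤ xs.foldl (fun m v => max v m) 0 := mem_le_foldl_max y xs 0 hy
    have h2 : 0 ≤ y := hpos y hy
    have h3 : y = 0 := le_antisymm (h ▸ h1) h2
    unfold runMax
    rw [h]
    exact h3 ▸ hy
  · exact h

theorem runMax_append (xs : List Int) (x : Int) : runMax (xs ++ [x]) = max x (runMax xs) := by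
  simp [runMax, List.foldl_append]

-- find? only looks at predicate values on members
theorem find?_congr_mem {α : Type} (l : List α) (p q : α → Bool) (h : ∀ a ∈ l, p a = q a) :
    l.find? p = l.find? q := by
  induction l with
  | nil => rfl
  | cons a t ih =>
    have hpa := h a (by simp)
    by_cases hq : q a
    · rw [List.find?_cons_of_pos (by rw [hpa]; exact hq), List.find?_cons_of_pos hq]
    · rw [List.find?_cons_of_neg (by rw [hpa]; simpa using hq), List.find?_cons_of_neg (by simpa using hq)]
      exact ih (fun a ha => h a (List.mem_cons_of_mem _ ha))

theorem enumerate_map {α β : Type} (f : α → β) (l : List α) :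
    ∀ s : Int, PySem.List.enumerate (l.map f) s = (PySem.List.enumerate l s).map (fun p => (p.1, f p.2)) := by
  induction l with
  | nil => intro s; rfl
  | cons a t ih => intro s; simp [PySem.List.enumerate_cons, ih]

-- reference forms of the two ports over the bare score list
def refA (xs : List Int) : Int :=
  (((PySem.List.enumerate xs).find? (fun p => p.2 == runMax xs)).map (fun p => p.1 + 1)).getD 0

def refB (xs : List Int) : Int × Int :=
  (PySem.List.enumerate xs).foldl (fun st p => if p.2 > st.2 then (p.1 + 1, p.2) else st) (0, -1)

theorem refB_eq (xs : List Int) (hpos : ∀ x ∈ xs, 0 ≤ x) :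
    refB xs = if xs = [] then ((0 : Int), (-1 : Int)) else (refA xs, runMax xs) := by
  induction xs using List.reverseRecOn with
  | nil => simp [refB, PySem.List.enumerate_nil]
  | append_singleton xs x ih =>
    have hx : 0 ≤ x := hpos x (by simp)
    have hstep : refB (xs ++ [x]) =
        (if x > (refB xs).2 then (((xs.length : Int)) + 1, x) else refB xs) := by
      simp [refB, PySem.List.enumerate_append, List.foldl_append,
            PySem.List.enumerate_cons, PySem.List.enumerate_nil]
    by_cases hnil : xs = []
    · subst hnil
      have hmax : runMax [x] = x := by simp [runMax, max_eq_left hx]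
      simp only [List.nil_append] at hstep ⊢
      rw [hstep]
      simp [refB, refA, PySem.List.enumerate_nil, PySem.List.enumerate_cons, hmax,
            show x > (-1 : Int) from by omega]
    · have hposx : ∀ y ∈ xs, 0 ≤ y := fun y hy => hpos y (by simp [hy])
      have ihx : refB xs = (refA xs, runMax xs) := by rw [ih hposx, if_neg hnil]
      rw [hstep, ihx, if_neg (by simp : ¬ xs ++ [x] = [])]
      by_cases hcmp : runMax xs < x
      · rw [if_pos (by simpa using hcmp)]
        have hmx : runMax (xs ++ [x]) = x := by
          rw [runMax_append]; exact max_eq_left (le_of_lt hcmp)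
        have h1 : (PySem.List.enumerate xs 0).find? (fun p => p.2 == x) = none := by
          apply List.find?_eq_none.mpr
          intro p hp
          obtain ⟨k, hk, rfl⟩ := (PySem.List.mem_enumerate_iff _ _ _).mp hp
          have hle : xs[k] ≤ runMax xs := mem_le_foldl_max _ xs 0 (by exact List.getElem_mem hk)
          simp only [beq_iff_eq]
          intro hEq
          omega
        have hfind : (PySem.List.enumerate (xs ++ [x]) 0).find? (fun p => p.2 == x)
            = some (((0 : Int) + xs.length), x) := by
          rw [PySem.List.enumerate_append, List.find?_append, h1]
          simp [PySem.List.enumerate_cons, PySem.List.enumerate_nil]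
        have hrefA : refA (xs ++ [x]) = (xs.length : Int) + 1 := by
          unfold refA
          rw [hmx, hfind]
          simp
        rw [hrefA, hmx]
      · rw [if_neg (by simpa using hcmp)]
        have hxle : x ≤ runMax xs := not_lt.mp hcmp
        have hmx : runMax (xs ++ [x]) = runMax xs := by
          rw [runMax_append]; exact max_eq_right hxle
        have hmem : runMax xs ∈ xs := runMax_mem xs hnil hposx
        obtain ⟨k, hk, hkv⟩ := List.mem_iff_getElem.mp hmem
        have hsome : ((PySem.List.enumerate xs 0).find? (fun p => p.2 == runMax xs)).isSome := by
          apply List.find?_isSome.mpr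
          exact ⟨((0 : Int) + k, xs[k]), (PySem.List.mem_enumerate_iff _ _ _).mpr ⟨k, hk, rfl⟩, by simp [hkv]⟩
        obtain ⟨q, hq⟩ := Option.isSome_iff_exists.mp hsome
        have hrefA : refA (xs ++ [x]) = refA xs := by
          unfold refA
          rw [hmx, PySem.List.enumerate_append, List.find?_append, hq]
          rfl
        rw [hrefA, hmx]

-- A's points dict, characterised
theorem keys_map_nodup (lines : List (List (String × Int))) :
    ((PySem.List.enumerate lines 0).map (fun il : Int × List (String × Int) => il.1 + 1)).Nodup := by
  have hp : ((PySem.List.enumerate lines 0).map (fun il : Int × List (String × Int) => il.1 + 1)).Pairwise (· < ·) := by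
    rw [List.pairwise_map]
    exact (PySem.List.pairwise_lt_enumerate lines 0).imp (fun h => by omega)
  exact hp.imp (fun h => ne_of_lt h)

theorem points_items (lines : List (List (String × Int))) (dict : List (String × Int)) :
    (solvePoints lines dict).items
      = (PySem.List.enumerate lines).map (fun il => (il.1 + 1, solveScore dict il.2)) := by
  unfold solvePoints
  rw [show (PySem.List.enumerate lines).map (fun il : Int × List (String × Int) => (il.1 + 1, solveScore dict il.2))
        = (PySem.Dict.empty : PySem.Dict Int Int).items
            ++ (PySem.List.enumerate lines).map (fun il => (il.1 + 1, solveScore dict il.2)) from by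
      rw [show (PySem.Dict.empty : PySem.Dict Int Int).items = [] from rfl, List.nil_append]]
  apply PySem.Dict.items_foldl_insert_fresh
  all_goals first
    | (intro a _; simp [PySem.Dict.contains_empty])
    | exact keys_map_nodup lines

theorem points_keys_nodup (lines : List (List (String × Int))) (dict : List (String × Int)) :
    (solvePoints lines dict).keys.Nodup := by
  have h := keys_map_nodup lines
  simp only [PySem.Dict.keys, points_items, List.map_map]
  exact h

theorem points_getD (lines : List (List (String × Int))) (dict : List (String × Int))
    (il : Int × List (String × Int)) (hmem : il ∈ PySem.List.enumerate lines 0) :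
    (solvePoints lines dict).getD (il.1 + 1) 0 = solveScore dict il.2 := by
  apply PySem.Dict.getD_of_mem_items
  · rw [points_items]
    exact List.mem_map_of_mem hmem
  · exact points_keys_nodup lines dict

theorem mx_eq (lines : List (List (String × Int))) (dict : List (String × Int)) :
    solveMx (solvePoints lines dict) = runMax (lines.map (solveScore dict)) := by
  unfold solveMx runMax
  simp only [PySem.Dict.keys, points_items, List.map_map, List.foldl_map, Function.comp_def]
  have hcongr : (PySem.List.enumerate lines).foldl
        (fun x (y : Int × List (String × Int)) => max ((solvePoints lines dict).getD (y.1 + 1) 0) x) 0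
      = (PySem.List.enumerate lines).foldl (fun x y => max (solveScore dict y.2) x) 0 :=
    PySem.List.foldl_congr_mem _ _ _ _ (fun acc il hil => by rw [points_getD lines dict il hil])
  rw [hcongr]
  conv_rhs => rw [← PySem.List.map_snd_enumerate lines (0 : Int), List.foldl_map]

theorem find_eq (lines : List (List (String × Int))) (dict : List (String × Int)) (c : Int) :
    (solvePoints lines dict).keys.find? (fun p => (solvePoints lines dict).getD p 0 == c)
      = ((PySem.List.enumerate lines).find? (fun il => solveScore dict il.2 == c)).map
          (fun il => il.1 + 1) := by
  simp only [PySem.Dict.keys, points_items, List.map_map, List.find?_map, Function.comp_def]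
  rw [find?_congr_mem _ _ (fun il => solveScore dict il.2 == c)
      (show ∀ il ∈ PySem.List.enumerate lines 0,
          ((solvePoints lines dict).getD (il.1 + 1) 0 == c) = (solveScore dict il.2 == c) from
        fun il hil => by rw [points_getD lines dict il hil])]

theorem solve_eq_refA (lines : List (List (String × Int))) (dict : List (String × Int)) :
    solve lines dict = refA (lines.map (solveAltScore dict)) := by
  have hscore : lines.map (solveScore dict) = lines.map (solveAltScore dict) :=
    List.map_congr_left (fun l _ => score_eq dict l)
  have hmatch : ∀ o : Option Int, (match o with | some p => p | none => (0 : Int)) = o.getD 0 := by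
    intro o; cases o <;> rfl
  have hA : solve lines dict
      = ((solvePoints lines dict).keys.find?
          (fun p => (solvePoints lines dict).getD p 0 == solveMx (solvePoints lines dict))).getD 0 :=
    hmatch _
  rw [hA, find_eq, mx_eq, hscore,
      find?_congr_mem _ _
        (fun il => solveAltScore dict il.2 == runMax (lines.map (solveAltScore dict)))
        (fun il _ => by rw [score_eq])]
  unfold refA
  rw [enumerate_map, List.find?_map, Option.map_map]
  rfl

theorem solve_alt_eq_refB (lines : List (List (String × Int))) (dict : List (String × Int)) :
    solve_alt lines dict = (refB (lines.map (solveAltScore dict))).1 := by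
  unfold solve_alt refB
  rw [enumerate_map, List.foldl_map]

-- ===== VERDICT (by name: the statement is the Claim_ definition above) =====
theorem solve_spec : Claim_equal_solve := by
  intro lines dict _ _
  unfold Spec_solve
  rw [solve_eq_refA lines dict, solve_alt_eq_refB]
  rw [refB_eq _ (by intro x hx; obtain ⟨l, -, rfl⟩ := List.mem_map.mp hx; exact score_nonneg dict l)]
  by_cases h : lines.map (solveAltScore dict) = []
  · simp [h, refA, runMax]
  · simp [h]
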